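-- pv_equiv track=rewrite | github.com/gwimbly03/blackICE | core/logger.py | _calculate_scan_summary
-- ===== SOURCE A (Python) =====
-- def _calculate_scan_summary(findings):
--     """
--     Calculate summary statistics from scan findings
--     """
--     if not findings:
--         return {}
--
--     status_counts = {}
--     for finding in findings:
--         status = finding.get('status', 'UNKNOWN')
--         status_counts[status] = status_counts.get(status, 0) + 1
--
--     return {
--         'total_checks': len(findings),
--         'passed': status_counts.get('PASS', 0),
--         'warnings': status_counts.get('WARNING', 0),
--         'critical': status_counts.get('CRITICAL', 0),
--         'unknown': status_counts.get('UNKNOWN', 0)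
--     }
-- ===== SOURCE B (Python) =====
-- def _calculate_scan_summary(findings):
--     if not findings:
--         return {}
--     def tally(wanted):
--         return sum(1 for f in findings if f.get('status', 'UNKNOWN') == wanted)
--     return {
--         'total_checks': len(findings),
--         'passed': tally('PASS'),
--         'warnings': tally('WARNING'),
--         'critical': tally('CRITICAL'),
--         'unknown': tally('UNKNOWN'),
--     }
-- ===== Notes on version B (the rewrite author's own statement) =====
-- stated objective: simpler
-- what changed: Replaces the dict-building counting pass plus per-key lookups with direct targeted scans: each summary field is computed by its own count over the findings, no intermediate status_counts dict.
import Mathlib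
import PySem

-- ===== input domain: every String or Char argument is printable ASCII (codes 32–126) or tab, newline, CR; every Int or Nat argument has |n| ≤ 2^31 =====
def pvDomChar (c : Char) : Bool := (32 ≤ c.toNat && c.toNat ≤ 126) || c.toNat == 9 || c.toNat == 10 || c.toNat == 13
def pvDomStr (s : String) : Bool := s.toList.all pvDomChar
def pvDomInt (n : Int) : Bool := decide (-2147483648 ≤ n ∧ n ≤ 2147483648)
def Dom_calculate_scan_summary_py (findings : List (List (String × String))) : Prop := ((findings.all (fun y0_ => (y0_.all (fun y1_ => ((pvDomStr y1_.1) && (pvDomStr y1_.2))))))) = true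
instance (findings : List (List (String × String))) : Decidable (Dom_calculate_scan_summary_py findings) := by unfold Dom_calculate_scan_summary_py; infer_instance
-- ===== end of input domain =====

-- B replaces A's dict-building counting pass with direct per-status counts; objective: simpler.


-- ===== PORT A =====
-- finding.get('status', 'UNKNOWN') on the association-list encoding of a Python dict
def pvStatusGet (f : List (String × String)) : String :=
  (PySem.Dict.mk f).getD "status" "UNKNOWN"

def calculate_scan_summary_py (findings : List (List (String × String))) : List (String × Int) :=
  if findings = [] then []
  else
    let status_counts : PySem.Dict String Int :=
      findings.foldl (fun d finding =>
        let status := pvStatusGet finding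
        d.insert status (d.getD status 0 + 1)) PySem.Dict.empty
    [("total_checks", (findings.length : Int)),
     ("passed", status_counts.getD "PASS" 0),
     ("warnings", status_counts.getD "WARNING" 0),
     ("critical", status_counts.getD "CRITICAL" 0),
     ("unknown", status_counts.getD "UNKNOWN" 0)]

-- ===== PORT B =====
-- tally(wanted) = sum(1 for f in findings if f.get('status','UNKNOWN') == wanted)
def pvTally (findings : List (List (String × String))) (wanted : String) : Int :=
  (findings.countP (fun f => pvStatusGet f == wanted) : Int)

def calculate_scan_summary_py_alt (findings : List (List (String × String))) : List (String × Int) :=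
  if findings = [] then []
  else
    [("total_checks", (findings.length : Int)),
     ("passed", pvTally findings "PASS"),
     ("warnings", pvTally findings "WARNING"),
     ("critical", pvTally findings "CRITICAL"),
     ("unknown", pvTally findings "UNKNOWN")]

-- ===== PRECONDITION & SPEC =====
def Spec_calculate_scan_summary_py (findings : List (List (String × String))) (out : List (String × Int)) : Prop := out = calculate_scan_summary_py_alt findings
instance (findings : List (List (String × String))) (out : List (String × Int)) : Decidable (Spec_calculate_scan_summary_py findings out) := by unfold Spec_calculate_scan_summary_py; infer_instance

-- ===== CLAIM (what is proved, stated in full; the proofs are below) =====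
def Claim_equal_calculate_scan_summary_py : Prop := ∀ (findings : List (List (String × String))), Dom_calculate_scan_summary_py findings → Spec_calculate_scan_summary_py findings (calculate_scan_summary_py findings)

-- ===== LEMMAS AND PROOFS =====

-- A's counting loop over findings is the counting loop over the mapped statuses
theorem pv_counter_eq (findings : List (List (String × String))) :
    findings.foldl (fun (d : PySem.Dict String Int) finding =>
        d.insert (pvStatusGet finding) (d.getD (pvStatusGet finding) 0 + 1)) PySem.Dict.empty
    = (findings.map pvStatusGet).foldl
        (fun d s => d.insert s (d.getD s 0 + 1)) PySem.Dict.empty := by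
  rw [List.foldl_map]

-- each lookup in A's status_counts is B's targeted count
theorem pv_getD_eq_tally (findings : List (List (String × String))) (s : String) :
    (findings.foldl (fun d finding =>
        d.insert (pvStatusGet finding) (d.getD (pvStatusGet finding) 0 + 1)) PySem.Dict.empty).getD s 0
    = pvTally findings s := by
  rw [pv_counter_eq findings, PySem.Dict.getD_foldl_insert_add_one]
  simp [pvTally, List.count_eq_countP, List.countP_map, Function.comp_def]

-- ===== VERDICT (by name: the statement is the Claim_ definition above) =====
theorem calculate_scan_summary_py_spec : Claim_equal_calculate_scan_summary_py := by
  intro findings _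
  unfold Spec_calculate_scan_summary_py calculate_scan_summary_py calculate_scan_summary_py_alt
  by_cases h : findings = [] <;> simp [h, pv_getD_eq_tally]
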